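-- pv_equiv track=rewrite | github.com/Swanand01/pynix.sh | app/ui/prompt.py | get_auto_indent
-- ===== SOURCE A (Python) =====
-- def get_auto_indent(text):
--     """Calculate auto-indent for Python code based on the last line."""
--     for line in reversed(text.split('\n')):
--         if line.strip():
--             indent = len(line) - len(line.lstrip())
--             if line.rstrip().endswith(':'):
--                 return ' ' * (indent + 4)
--             return ' ' * indent
--     return ''
-- ===== SOURCE B (Python) =====
-- def get_auto_indent(text):
--     """Calculate auto-indent for Python code based on the last line."""
--     t = text.rstrip()
--     if not t:
--         return ''
--     last = t[t.rfind('\n') + 1:]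
--     indent = len(last) - len(last.lstrip())
--     return ' ' * (indent + 4 if last.endswith(':') else indent)
-- ===== Notes on version B (the rewrite author's own statement) =====
-- stated objective: alternative
-- what changed: B does not split the text into lines or loop over them at all: it rstrips the whole text once (discarding trailing blank lines and whitespace in one stroke) and takes the substring after the last newline via rfind as the last non-blank line.
import Mathlib
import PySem

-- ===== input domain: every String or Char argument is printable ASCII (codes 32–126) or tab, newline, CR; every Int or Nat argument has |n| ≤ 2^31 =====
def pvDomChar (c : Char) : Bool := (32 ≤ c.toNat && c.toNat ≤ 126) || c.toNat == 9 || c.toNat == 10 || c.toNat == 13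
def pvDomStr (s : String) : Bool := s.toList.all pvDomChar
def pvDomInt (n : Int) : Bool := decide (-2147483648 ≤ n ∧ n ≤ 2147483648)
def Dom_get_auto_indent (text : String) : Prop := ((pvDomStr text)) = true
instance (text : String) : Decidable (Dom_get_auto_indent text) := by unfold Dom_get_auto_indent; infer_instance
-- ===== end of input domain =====

-- B avoids splitting into lines and looping altogether: it rstrips the whole text and
-- takes the substring after the last '\n' (rfind) as the last non-blank line (alternative).

-- ' ' * n (Python string repetition; n is never negative here)
def pvSpaces (n : Int) : String := String.ofList (PySem.List.pyRepeat [' '] n)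

-- ===== PORT A =====
-- the reversed() loop with early return, as structural recursion over the reversed list
def pvGoA : List String → String
  | [] => ""
  | l :: rest =>
    if PySem.Str.strip l ≠ "" then
      let indent := PySem.Str.len l - PySem.Str.len (PySem.Str.lstrip l)
      if PySem.Str.endswith (PySem.Str.rstrip l) ":" then pvSpaces (indent + 4)
      else pvSpaces indent
    else pvGoA rest

def get_auto_indent (text : String) : String :=
  pvGoA ((PySem.Str.split? text "\n").getD []).reverse

-- ===== PORT B =====
-- t = text.rstrip(); if not t: ''; last = t[t.rfind('\n') + 1:]; indent of last; spaces
def get_auto_indent_alt (text : String) : String :=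
  let t := PySem.Str.rstrip text
  if t = "" then ""
  else
    let last := PySem.Str.slice t (some (PySem.Str.rfind t "\n" + 1)) none
    let indent := PySem.Str.len last - PySem.Str.len (PySem.Str.lstrip last)
    pvSpaces (if PySem.Str.endswith last ":" then indent + 4 else indent)

-- ===== PRECONDITION & SPEC =====
def Spec_get_auto_indent (text : String) (out : String) : Prop := out = get_auto_indent_alt text
instance (text : String) (out : String) : Decidable (Spec_get_auto_indent text out) := by unfold Spec_get_auto_indent; infer_instance

-- ===== CLAIM (what is proved, stated in full; the proofs are below) =====
def Claim_equal_get_auto_indent : Prop := ∀ (text : String), Dom_get_auto_indent text → Spec_get_auto_indent text (get_auto_indent text)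

-- ===== LEMMAS AND PROOFS =====

-- char-level mirror of A's loop
def pvAch : List (List Char) → String
  | [] => ""
  | p :: rest =>
    if PySem.Chars.strip p ≠ [] then
      let indent := (p.length : Int) - ((PySem.Chars.lstrip p).length : Int)
      if PySem.Chars.endswith (PySem.Chars.rstrip p) [':'] then pvSpaces (indent + 4)
      else pvSpaces indent
    else pvAch rest

-- char-level core of B, applied to the already-rstripped text
def pvBcore (t : List Char) : String :=
  if t = [] then ""
  else
    pvSpaces
      (if PySem.Chars.endswith
            (PySem.Chars.slice t (some (PySem.Chars.rfind t ['\n'] + 1)) none) [':'] then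
        ((PySem.Chars.slice t (some (PySem.Chars.rfind t ['\n'] + 1)) none).length : Int)
          - ((PySem.Chars.lstrip
              (PySem.Chars.slice t (some (PySem.Chars.rfind t ['\n'] + 1)) none)).length : Int) + 4
      else
        ((PySem.Chars.slice t (some (PySem.Chars.rfind t ['\n'] + 1)) none).length : Int)
          - ((PySem.Chars.lstrip
              (PySem.Chars.slice t (some (PySem.Chars.rfind t ['\n'] + 1)) none)).length : Int))

theorem pvOfList_eq_empty_iff (l : List Char) : String.ofList l = "" ↔ l = [] := by
  constructor
  · intro h
    have := congrArg String.toList h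
    simpa using this
  · intro h; simp [h]

theorem pvLstrip_eq_nil_iff (p : List Char) :
    PySem.Chars.lstrip p = [] ↔ p.all PySem.Chars.isspace := by
  simp [PySem.Chars.lstrip, List.dropWhile_eq_nil_iff, List.all_eq_true]

theorem pvRstrip_eq_nil_iff (p : List Char) :
    PySem.Chars.rstrip p = [] ↔ p.all PySem.Chars.isspace := by
  simp [PySem.Chars.rstrip, List.dropWhile_eq_nil_iff, List.all_eq_true]

theorem pvStrip_eq_nil_iff (p : List Char) :
    PySem.Chars.strip p = [] ↔ p.all PySem.Chars.isspace := by
  rw [PySem.Chars.strip, pvRstrip_eq_nil_iff]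
  simp only [PySem.Chars.lstrip, List.all_eq_true]
  constructor
  · intro h x hx
    by_cases hxs : PySem.Chars.isspace x = true
    · exact hxs
    · rcases (List.takeWhile_append_dropWhile (p := PySem.Chars.isspace) (l := p)) ▸ hx with _
      rcases List.mem_append.1 ((List.takeWhile_append_dropWhile (p := PySem.Chars.isspace) (l := p)) ▸ hx) with h1 | h2
      · exact List.mem_takeWhile_imp h1
      · exact h x h2
  · intro h x hx
    exact h x ((List.dropWhile_suffix _).mem hx)

theorem pvRstrip_append_space (x y : List Char) (h : y.all PySem.Chars.isspace) :
    PySem.Chars.rstrip (x ++ y) = PySem.Chars.rstrip x := by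
  simp only [PySem.Chars.rstrip, List.reverse_append]
  rw [List.dropWhile_append]
  simp only [List.all_eq_true] at h
  have : y.reverse.dropWhile PySem.Chars.isspace = [] := by
    rw [List.dropWhile_eq_nil_iff]; intro x hx; exact h x (List.mem_reverse.1 hx)
  simp [this]

theorem pvRstrip_append_right (x y : List Char) (h : PySem.Chars.rstrip y ≠ []) :
    PySem.Chars.rstrip (x ++ y) = x ++ PySem.Chars.rstrip y := by
  simp only [PySem.Chars.rstrip, List.reverse_append]
  rw [List.dropWhile_append]
  have : (y.reverse.dropWhile PySem.Chars.isspace).isEmpty = false := by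
    simp only [PySem.Chars.rstrip] at h
    rw [List.isEmpty_eq_false_iff]
    intro hc; exact h (by simp [hc])
  simp [this]

theorem pvRstrip_prefix (p : List Char) : PySem.Chars.rstrip p <+: p := by
  have := List.IsSuffix.reverse (List.dropWhile_suffix (l := p.reverse) (p := PySem.Chars.isspace))
  simpa [PySem.Chars.rstrip] using this

theorem pvRfindGo_neg (y : List Char) (c : Char) (h : c ∉ y) (j : Nat) :
    PySem.Chars.rfind.go y [c] j = -1 := by
  induction j with
  | zero =>
    rw [PySem.Chars.rfind.go]
    have : ¬ [c].isPrefixOf y = true := by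
      rw [List.isPrefixOf_iff_prefix]
      intro hp; exact h (hp.mem (by simp))
    simp [this]
  | succ j ih =>
    rw [PySem.Chars.rfind.go]
    have : ¬ [c].isPrefixOf (y.drop (j+1)) = true := by
      rw [List.isPrefixOf_iff_prefix]
      intro hp; exact h ((List.drop_subset _ _) (hp.mem (by simp)))
    simp [this, ih]

theorem pvRfindGo_found (x y : List Char) (c : Char) (h : c ∉ y) (d : Nat) :
    PySem.Chars.rfind.go (x ++ c :: y) [c] (x.length + d) = (x.length : Int) := by
  induction d with
  | zero =>
    match hx : x.length with
    | 0 =>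
      rw [PySem.Chars.rfind.go]
      have hx0 : x = [] := List.length_eq_zero_iff.1 hx
      subst hx0
      simp
    | Nat.succ k =>
      have hx' : x.length = k + 1 := hx
      have hstep : PySem.Chars.rfind.go (x ++ c :: y) [c] (k+1)
          = if [c].isPrefixOf ((x ++ c :: y).drop (k+1)) = true then ((k+1 : Nat) : Int)
            else PySem.Chars.rfind.go (x ++ c :: y) [c] k := by
        rw [PySem.Chars.rfind.go]
      have hpre : [c].isPrefixOf ((x ++ c :: y).drop (k+1)) = true := by
        have hd : (x ++ c :: y).drop (k+1) = c :: y := by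
          rw [← hx', List.drop_left]
        rw [hd]
        simp
      rw [hstep, if_pos hpre]
  | succ d ih =>
    have hstep : PySem.Chars.rfind.go (x ++ c :: y) [c] (x.length + d + 1)
        = if [c].isPrefixOf ((x ++ c :: y).drop (x.length + d + 1)) = true
          then ((x.length + d + 1 : Nat) : Int)
          else PySem.Chars.rfind.go (x ++ c :: y) [c] (x.length + d) := by
      rw [PySem.Chars.rfind.go]
    have hnp : ¬ [c].isPrefixOf ((x ++ c :: y).drop (x.length + d + 1)) = true := by
      rw [List.isPrefixOf_iff_prefix]
      intro hp
      have hmem : c ∈ (x ++ c :: y).drop (x.length + d + 1) := hp.mem (by simp)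
      have heq : (x ++ c :: y).drop (x.length + d + 1) = y.drop d := by
        have h2 : x ++ c :: y = (x ++ [c]) ++ y := by simp
        have h3 : x.length + d + 1 = (x ++ [c]).length + d := by
          simp only [List.length_append, List.length_cons, List.length_nil]; omega
        conv_lhs => rw [h2, h3]
        rw [List.drop_append]
        rw [List.drop_eq_nil_of_le (by simp), List.nil_append]
        congr 1
        simp
      exact h (List.drop_subset _ _ (heq ▸ hmem))
    rw [← Nat.add_assoc, hstep, if_neg hnp, ih]

theorem pvRfind_neg (y : List Char) (c : Char) (h : c ∉ y) :
    PySem.Chars.rfind y [c] = -1 := pvRfindGo_neg y c h y.length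

theorem pvRfind_append (x y : List Char) (c : Char) (h : c ∉ y) :
    PySem.Chars.rfind (x ++ c :: y) [c] = (x.length : Int) := by
  have hl : (x ++ c :: y).length = x.length + (y.length + 1) := by simp
  rw [PySem.Chars.rfind, hl]
  exact pvRfindGo_found x y c h (y.length + 1)

theorem pvSplitOnGo_single (c : Char) (fuel : Nat) :
    ∀ (l cur : List Char) (acc : List (List Char)), l.length ≤ fuel →
      PySem.Chars.splitOn.go [c] fuel l cur acc
        = acc.reverse ++ (l.splitOn c).modifyHead (cur.reverse ++ ·) := by
  induction fuel with
  | zero =>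
    intro l cur acc h
    have : l = [] := List.eq_nil_of_length_eq_zero (Nat.le_zero.1 h)
    subst this
    simp [PySem.Chars.splitOn.go, List.splitOn_nil]
  | succ fuel ih =>
    intro l cur acc h
    match l with
    | [] => simp [PySem.Chars.splitOn.go, List.splitOn_nil]
    | c' :: rest =>
      rw [PySem.Chars.splitOn.go]
      by_cases hc : c = c'
      · subst hc
        have hp : [c].isPrefixOf (c :: rest) = true := by simp
        rw [if_pos hp]
        rw [List.length_singleton, List.drop_one, List.tail_cons]
        rw [ih rest [] (cur.reverse :: acc) (by simpa using Nat.lt_succ_iff.1 (by simpa using h))]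
        simp only [List.splitOn, List.splitOnP_cons]
        simp
        exact congrFun List.modifyHead_id _
      · have hp : ¬ [c].isPrefixOf (c' :: rest) = true := by
          rw [List.isPrefixOf_iff_prefix]
          intro hpre
          rcases List.cons_prefix_cons.1 hpre with ⟨he, _⟩
          exact hc he
        rw [if_neg hp]
        rw [ih rest (c' :: cur) acc (by simpa using Nat.lt_succ_iff.1 (by simpa using h))]
        simp only [List.splitOn, List.splitOnP_cons]
        have hcc : (c' == c) = false := by simp; exact fun e => hc e.symm
        rw [hcc]
        simp only [List.reverse_cons]
        have : (fun (x : List Char) => cur.reverse ++ [c'] ++ x) = ((fun x => cur.reverse ++ x) ∘ (fun x => c' :: x)) := by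
          funext t; simp
        rw [this]
        simp [List.modifyHead_modifyHead]

theorem pvSplitOn_single (s : List Char) (c : Char) :
    PySem.Chars.splitOn s [c] = s.splitOn c := by
  rw [PySem.Chars.splitOn, pvSplitOnGo_single c (s.length + 1) s [] [] (by omega)]
  simp
  exact congrFun List.modifyHead_id _

theorem pvNotMem_splitOn (s : List Char) (c : Char) :
    ∀ p ∈ s.splitOn c, c ∉ p := by
  induction s with
  | nil => intro p hp; simp [List.splitOn_nil] at hp; simp [hp]
  | cons a as ih =>
    intro p hp
    simp only [List.splitOn, List.splitOnP_cons] at hp ih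
    by_cases ha : (a == c) = true
    · rw [if_pos ha] at hp
      rcases List.mem_cons.1 hp with h1 | h2
      · simp [h1]
      · exact ih p h2
    · rw [if_neg ha] at hp
      rcases hr : List.splitOnP (fun x => x == c) as with _ | ⟨r, rs⟩
      · exact absurd hr (List.splitOnP_ne_nil _ _)
      · rw [hr] at hp ih
        simp only [List.modifyHead] at hp
        rcases List.mem_cons.1 hp with h1 | h2
        · subst h1
          intro hmem
          rcases List.mem_cons.1 hmem with he | hm
          · exact ha (by simp [he])
          · exact ih r (by simp) hm
        · exact ih p (List.mem_cons_of_mem _ h2)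

theorem pvIntercalate_cons_cons (sep a b : List Char) (l : List (List Char)) :
    List.intercalate sep (a :: b :: l) = a ++ sep ++ List.intercalate sep (b :: l) := by
  simp [List.intercalate, List.intersperse]

theorem pvIntercalate_append_singleton (sep p : List Char) (ls : List (List Char)) (h : ls ≠ []) :
    List.intercalate sep (ls ++ [p]) = List.intercalate sep ls ++ sep ++ p := by
  induction ls with
  | nil => exact absurd rfl h
  | cons a as ih =>
    rcases as with _ | ⟨b, bs⟩
    · simp [List.intercalate]
    · simp only [List.cons_append]
      rw [pvIntercalate_cons_cons, pvIntercalate_cons_cons, ← List.cons_append, ih (by simp)]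
      simp

theorem pvNonblank_facts (p : List Char) (h : PySem.Chars.strip p ≠ []) :
    PySem.Chars.rstrip p ≠ [] ∧
    PySem.Chars.lstrip (PySem.Chars.rstrip p) = PySem.Chars.strip p ∧
    ((p.length : Int) - ((PySem.Chars.lstrip p).length : Int)
      = ((PySem.Chars.rstrip p).length : Int) - ((PySem.Chars.lstrip (PySem.Chars.rstrip p)).length : Int)) := by
  set w := p.takeWhile PySem.Chars.isspace with hw
  set q := p.dropWhile PySem.Chars.isspace with hqdef
  have hpwq : w ++ q = p := List.takeWhile_append_dropWhile
  have hlq : PySem.Chars.lstrip p = q := rfl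
  have hq : q ≠ [] := by
    intro hq0
    exact h (by rw [pvStrip_eq_nil_iff, ← pvLstrip_eq_nil_iff, hlq, hq0])
  have hhead : PySem.Chars.isspace (q.head hq) = false := List.head_dropWhile_not _ hq
  have hrq : PySem.Chars.rstrip q ≠ [] := by
    intro h0
    rw [pvRstrip_eq_nil_iff, List.all_eq_true] at h0
    rw [h0 (q.head hq) (List.head_mem hq)] at hhead
    exact absurd hhead (by simp)
  have hwsp : w.all PySem.Chars.isspace := by
    rw [List.all_eq_true]; intro x hx; exact List.mem_takeWhile_imp hx
  have hrp : PySem.Chars.rstrip p = w ++ PySem.Chars.rstrip q := by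
    rw [← hpwq]; exact pvRstrip_append_right w q hrq
  have hstrip : PySem.Chars.strip p = PySem.Chars.rstrip q := by
    rw [PySem.Chars.strip, hlq]
  have hrqq : PySem.Chars.lstrip (PySem.Chars.rstrip q) = PySem.Chars.rstrip q := by
    rcases hc : PySem.Chars.rstrip q with _ | ⟨a, t⟩
    · exact absurd hc hrq
    · have hpre : a :: t <+: q := hc ▸ pvRstrip_prefix q
      have ha : a = q.head hq := by
        rcases hpre with ⟨rest, hrest⟩
        have ha' : q.head? = some a := by rw [← hrest]; simp
        rw [List.head?_eq_some_head hq] at ha'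
        exact (Option.some_inj.1 ha').symm
      rw [PySem.Chars.lstrip, List.dropWhile_cons, ha, hhead]
      simp
  have hls : PySem.Chars.lstrip (PySem.Chars.rstrip p) = PySem.Chars.rstrip q := by
    rw [hrp, PySem.Chars.lstrip, List.dropWhile_append]
    have : w.dropWhile PySem.Chars.isspace = [] := by
      rw [List.dropWhile_eq_nil_iff]
      intro x hx; exact (List.all_eq_true.1 hwsp) x hx
    rw [this]
    simpa [PySem.Chars.lstrip] using hrqq
  refine ⟨by rw [hrp]; simp [hrq], by rw [hls, hstrip], ?_⟩
  rw [hls, hlq, hrp, ← hpwq]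
  simp only [List.length_append]
  push_cast; ring

theorem pvGoA_eq_pvAch (ls : List (List Char)) :
    pvGoA (ls.map String.ofList) = pvAch ls := by
  induction ls with
  | nil => rfl
  | cons p rest ih =>
    simp only [List.map_cons, pvGoA, pvAch, PySem.Str.strip, PySem.Str.len, PySem.Str.lstrip,
      PySem.Str.rstrip, PySem.Str.endswith, String.toList_ofList, ih,
      show ((":" : String).toList) = [':'] from rfl]
    by_cases hsp : PySem.Chars.strip p = []
    · simp [hsp]
    · simp [hsp]

theorem pvAlt_eq_pvBcore (text : String) :
    get_auto_indent_alt text = pvBcore (PySem.Chars.rstrip text.toList) := by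
  simp only [get_auto_indent_alt, pvBcore, PySem.Str.rstrip, PySem.Str.slice, PySem.Str.rfind,
    PySem.Str.len, PySem.Str.lstrip, PySem.Str.endswith, String.toList_ofList,
    pvOfList_eq_empty_iff, show (("\n" : String).toList) = ['\n'] from rfl,
    show ((":" : String).toList) = [':'] from rfl]

theorem pvMain (ls : List (List Char)) (h : ∀ p ∈ ls, '\n' ∉ p) :
    pvAch ls.reverse = pvBcore (PySem.Chars.rstrip (List.intercalate ['\n'] ls)) := by
  induction ls using List.reverseRecOn with
  | nil => simp [pvAch, pvBcore, List.intercalate, PySem.Chars.rstrip]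
  | append_singleton ls p ih =>
    have hp : '\n' ∉ p := h p (by simp)
    have hls : ∀ q ∈ ls, '\n' ∉ q := fun q hq => h q (by simp [hq])
    rw [List.reverse_append, List.reverse_singleton, List.singleton_append]
    by_cases hb : PySem.Chars.strip p = []
    · have hsp : p.all PySem.Chars.isspace := (pvStrip_eq_nil_iff p).1 hb
      have hA : pvAch (p :: ls.reverse) = pvAch ls.reverse := by
        simp [pvAch, hb]
      rcases eq_or_ne ls [] with hnil | hne
      · subst hnil
        rw [hA]
        have h1 : List.intercalate ['\n'] [p] = p := by simp [List.intercalate]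
        have h2 : PySem.Chars.rstrip p = [] := (pvRstrip_eq_nil_iff p).2 hsp
        simp only [List.nil_append]
        rw [h1, h2]
        simp [pvAch, pvBcore]
      · rw [hA, pvIntercalate_append_singleton _ _ _ hne, List.append_assoc,
          pvRstrip_append_space _ _ (by rw [List.singleton_append, List.all_cons, hsp]; decide)]
        exact ih hls
    · obtain ⟨hrp, hlsr, hlen⟩ := pvNonblank_facts p hb
      have hnlp : '\n' ∉ PySem.Chars.rstrip p := fun hm => hp ((pvRstrip_prefix p).subset hm)
      have hAv : pvAch (p :: ls.reverse) =
          (if PySem.Chars.endswith (PySem.Chars.rstrip p) [':']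
           then pvSpaces ((p.length : Int) - ((PySem.Chars.lstrip p).length : Int) + 4)
           else pvSpaces ((p.length : Int) - ((PySem.Chars.lstrip p).length : Int))) := by
        simp [pvAch, hb]
      rcases eq_or_ne ls [] with hnil | hne
      · subst hnil
        have h1 : List.intercalate ['\n'] [p] = p := by simp [List.intercalate]
        simp only [List.nil_append]
        rw [h1]
        have hfind : PySem.Chars.rfind (PySem.Chars.rstrip p) ['\n'] = -1 :=
          pvRfind_neg _ _ hnlp
        have hlast : PySem.Chars.slice (PySem.Chars.rstrip p) (some (-1 + 1)) none
            = PySem.Chars.rstrip p := by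
          norm_num
        rw [pvBcore, if_neg hrp]
        rw [hfind, hlast, hAv, ← hlen]
        split_ifs <;> rfl
      · have hr1 : PySem.Chars.rstrip (['\n'] ++ p) = '\n' :: PySem.Chars.rstrip p := by
          rw [pvRstrip_append_right _ _ hrp]
          rfl
        rw [pvIntercalate_append_singleton _ _ _ hne, List.append_assoc,
          pvRstrip_append_right _ _ (by rw [hr1]; simp), hr1]
        set X := List.intercalate ['\n'] ls with hX
        have hne2 : X ++ '\n' :: PySem.Chars.rstrip p ≠ [] := by simp
        have hfind : PySem.Chars.rfind (X ++ '\n' :: PySem.Chars.rstrip p) ['\n']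
            = (X.length : Int) := pvRfind_append _ _ _ hnlp
        have hlast : PySem.Chars.slice (X ++ '\n' :: PySem.Chars.rstrip p)
            (some ((X.length : Int) + 1)) none = PySem.Chars.rstrip p := by
          rw [PySem.Chars.slice_eq_listSlice]
          have : ((X.length : Int) + 1) = ((X.length + 1 : Nat) : Int) := by push_cast; ring
          rw [this, PySem.List.slice_from_natCast]
          have h2 : X ++ '\n' :: PySem.Chars.rstrip p = (X ++ ['\n']) ++ PySem.Chars.rstrip p := by
            simp
          rw [h2, show X.length + 1 = (X ++ ['\n']).length by simp, List.drop_left]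
        rw [pvBcore, if_neg hne2, hfind, hlast, hAv, ← hlen]
        split_ifs <;> rfl

-- ===== VERDICT (by name: the statement is the Claim_ definition above) =====
theorem get_auto_indent_spec : Claim_equal_get_auto_indent := by
  intro text _
  show get_auto_indent text = get_auto_indent_alt text
  have hsplit : (PySem.Str.split? text "\n").getD []
      = (text.toList.splitOn '\n').map String.ofList := by
    simp [PySem.Str.split?, PySem.Chars.split?, pvSplitOn_single]
  rw [get_auto_indent, hsplit, ← List.map_reverse, pvGoA_eq_pvAch, pvAlt_eq_pvBcore,
    pvMain _ (pvNotMem_splitOn _ _), List.intercalate_splitOn]
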